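-- pv_equiv track=rewrite | github.com/prasanna-28/Competitive-Programming | virtual_contests/2060/F. Multiplicative Arrays.py | dirichlet_convolution
-- ===== SOURCE A (Python) =====
-- MOD = 998244353
--
-- def dirichlet_convolution(f, g, k):
--     h = [0]*(k+1)
--     for i in range(1, k+1):
--         fi = f[i]
--         if fi != 0:
--             multiple = i
--             step = i
--             while multiple <= k:
--                 h[multiple] = (h[multiple] + fi*g[multiple//i]) % MOD
--                 multiple += step
--     return h
-- ===== SOURCE B (Python) =====
-- MOD = 998244353
--
-- def dirichlet_convolution(f, g, k):
--     h = [0]*(k+1)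
--     for n in range(1, k+1):
--         acc = 0
--         i = 1
--         while i*i <= n:
--             if n % i == 0:
--                 acc = (acc + f[i]*g[n//i]) % MOD
--                 j = n // i
--                 if j != i:
--                     acc = (acc + f[j]*g[i]) % MOD
--             i += 1
--         h[n] = acc
--     return h
-- ===== Notes on version B (the rewrite author's own statement) =====
-- stated objective: alternative
-- what changed: Replaced A's push-style harmonic sieve (outer loop over i, inner walk over multiples of i, skipping zero f[i]) by a pull-style per-target loop: for each n it enumerates divisor pairs by trial division up to sqrt(n) and accumulates f[i]*g[n//i] (+ the mirrored pair) mod MOD.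
-- outside the precondition, e.g. on dirichlet_convolution([0, 0], [], 1): A returns [0, 0], B raises IndexError
import Mathlib
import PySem

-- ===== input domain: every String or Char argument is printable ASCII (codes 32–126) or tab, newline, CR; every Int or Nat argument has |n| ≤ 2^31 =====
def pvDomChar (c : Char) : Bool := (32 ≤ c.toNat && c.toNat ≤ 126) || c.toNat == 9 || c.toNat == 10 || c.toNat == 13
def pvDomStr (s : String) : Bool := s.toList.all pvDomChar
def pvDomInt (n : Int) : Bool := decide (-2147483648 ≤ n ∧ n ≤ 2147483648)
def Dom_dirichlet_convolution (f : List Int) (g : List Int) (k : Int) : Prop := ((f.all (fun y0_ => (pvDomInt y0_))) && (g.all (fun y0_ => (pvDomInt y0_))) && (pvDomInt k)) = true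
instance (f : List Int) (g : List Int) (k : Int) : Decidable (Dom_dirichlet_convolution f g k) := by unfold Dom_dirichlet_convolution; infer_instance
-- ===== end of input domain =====

-- B re-implements A's push-style multiple sieve as a pull-style per-target divisor-pair
-- enumeration (trial division up to sqrt(n)); equal results, similar cost ("alternative").

def pvMOD : Int := 998244353

-- ===== PORT A =====
-- inner 'while multiple <= k' loop of A; the '1 ≤ i' conjunct is a totality guard only
-- (A always calls it with i ≥ 1).
def pvInnerA (fi : Int) (g : List Int) (k i : Int) (multiple : Int) (h : List Int) : List Int :=
  if _hc : 1 ≤ i ∧ multiple ≤ k then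
    pvInnerA fi g k i (multiple + i)
      (PySem.List.pySetD h multiple
        ((PySem.List.pyGetD h multiple 0 + fi * PySem.List.pyGetD g (PySem.Int.floordiv multiple i) 0) % pvMOD))
  else h
termination_by (k + 1 - multiple).toNat
decreasing_by omega

-- body of A's outer 'for i in range(1, k+1)' loop
def pvStepA (f : List Int) (g : List Int) (k : Int) (h : List Int) (i : Int) : List Int :=
  let fi := PySem.List.pyGetD f i 0
  if fi ≠ 0 then pvInnerA fi g k i i h else h

def dirichlet_convolution (f : List Int) (g : List Int) (k : Int) : List Int :=
  (PySem.List.pyRange 1 (k + 1) 1).foldl (pvStepA f g k) (List.replicate (k + 1).toNat 0)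

-- ===== PORT B =====
-- inner 'while i*i <= n' trial-division loop of B
def pvInnerB (f : List Int) (g : List Int) (n : Int) (i : Int) (acc : Int) : Int :=
  if hc : i * i ≤ n then
    pvInnerB f g n (i + 1)
      (if PySem.Int.mod n i = 0 then
        let acc1 := (acc + PySem.List.pyGetD f i 0 * PySem.List.pyGetD g (PySem.Int.floordiv n i) 0) % pvMOD
        let j := PySem.Int.floordiv n i
        if j ≠ i then (acc1 + PySem.List.pyGetD f j 0 * PySem.List.pyGetD g i 0) % pvMOD else acc1
      else acc)
  else acc
termination_by (n + 1 - i).toNat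
decreasing_by
  have h0 : (0:Int) ≤ i * i := mul_self_nonneg i
  have hin : i ≤ n := by
    rcases le_total i 0 with hi | hi
    · omega
    · nlinarith
  omega

def pvStepB (f : List Int) (g : List Int) (h : List Int) (n : Int) : List Int :=
  PySem.List.pySetD h n (pvInnerB f g n 1 0)

def dirichlet_convolution_alt (f : List Int) (g : List Int) (k : Int) : List Int :=
  (PySem.List.pyRange 1 (k + 1) 1).foldl (pvStepB f g) (List.replicate (k + 1).toNat 0)

-- ===== PRECONDITION & SPEC =====
-- Pre_ excludes inputs where either program raises IndexError: k ≥ 1 with f or g shorter than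
-- k+1 (A skips g lookups at indices where f is 0, so on some such inputs A still returns while
-- B raises; those accidental returns are excluded here — see the cite in claim.json).
def Pre_dirichlet_convolution (f : List Int) (g : List Int) (k : Int) : Prop :=
  k ≤ 0 ∨ (k < (f.length : Int) ∧ k < (g.length : Int))
instance (f : List Int) (g : List Int) (k : Int) : Decidable (Pre_dirichlet_convolution f g k) := by
  unfold Pre_dirichlet_convolution; infer_instance

def pvWitness_dirichlet_convolution : List Int × List Int × Int := ([0, 1], [0, 2], 1)

def Spec_dirichlet_convolution (f : List Int) (g : List Int) (k : Int) (out : List Int) : Prop := out = dirichlet_convolution_alt f g k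
instance (f : List Int) (g : List Int) (k : Int) (out : List Int) : Decidable (Spec_dirichlet_convolution f g k out) := by unfold Spec_dirichlet_convolution; infer_instance

-- ===== CLAIM (what is proved, stated in full; the proofs are below) =====
def Claim_equal_dirichlet_convolution : Prop := ∀ (f : List Int) (g : List Int) (k : Int), Dom_dirichlet_convolution f g k → Pre_dirichlet_convolution f g k → Spec_dirichlet_convolution f g k (dirichlet_convolution f g k)

-- ===== LEMMAS AND PROOFS =====

-- term of the Dirichlet convolution at target n, divisor d
def pvTerm (f g : List Int) (n d : ℕ) : Int := f.getD d 0 * g.getD (n / d) 0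

-- the common reference value of h[n] for n ≥ 1
def pvS (f g : List Int) (n : ℕ) : Int := (∑ d ∈ n.divisors, pvTerm f g n d) % pvMOD

theorem pvModFold (a b : Int) : (a % pvMOD + b) % pvMOD = (a + b) % pvMOD := by
  conv_rhs => rw [Int.add_emod]
  rw [Int.add_emod (a % pvMOD) b, Int.emod_emod_of_dvd _ dvd_rfl]

theorem pvGetD_set (l : List Int) (a : ℕ) (v : Int) (j : ℕ) :
    (l.set a v).getD j 0 = if j = a ∧ j < l.length then v else l.getD j 0 := by
  rw [List.getD_eq_getElem?_getD, List.getD_eq_getElem?_getD, List.getElem?_set]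
  split_ifs with h1 h2 h3 <;> simp_all <;> omega

-- ---- B side ----

theorem pvModFold2 (a b c : Int) :
    ((a % pvMOD + b) % pvMOD + c) % pvMOD = (a + b + c) % pvMOD := by
  rw [pvModFold a b, pvModFold (a + b) c]

theorem pvSumSameB (f g : List Int) (n i : ℕ) (hn : 1 ≤ n) (hnd : ¬ i ∣ n) :
    (∑ d ∈ n.divisors, if i ≤ d ∧ i ≤ n / d then pvTerm f g n d else 0)
      = ∑ d ∈ n.divisors, if i + 1 ≤ d ∧ i + 1 ≤ n / d then pvTerm f g n d else 0 := by
  refine Finset.sum_congr rfl ?_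
  intro d hd
  obtain ⟨hdvd, hn0⟩ := Nat.mem_divisors.mp hd
  have hdn : n / d ∣ n := Nat.div_dvd_of_dvd hdvd
  have hdi : d ≠ i := fun h => hnd (h ▸ hdvd)
  have hndi : n / d ≠ i := fun h => hnd (h ▸ hdn)
  by_cases hc : i ≤ d ∧ i ≤ n / d
  · rw [if_pos hc, if_pos ⟨Nat.lt_of_le_of_ne hc.1 (Ne.symm hdi),
      Nat.lt_of_le_of_ne hc.2 (Ne.symm hndi)⟩]
  · rw [if_neg hc, if_neg (fun hx => hc ⟨Nat.le_of_succ_le hx.1, Nat.le_of_succ_le hx.2⟩)]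

theorem pvSumStepB (f g : List Int) (n i : ℕ) (hn : 1 ≤ n) (hi : 1 ≤ i)
    (hii : i * i ≤ n) (hdvd : i ∣ n) :
    (∑ d ∈ n.divisors, if i ≤ d ∧ i ≤ n / d then pvTerm f g n d else 0)
      = pvTerm f g n i + (if n / i ≠ i then pvTerm f g n (n / i) else 0)
        + ∑ d ∈ n.divisors, if i + 1 ≤ d ∧ i + 1 ≤ n / d then pvTerm f g n d else 0 := by
  have hn0 : n ≠ 0 := by omega
  have hiy : i ∈ n.divisors := Nat.mem_divisors.mpr ⟨hdvd, hn0⟩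
  have hni : n / (n / i) = i := Nat.div_div_self hdvd hn0
  have hnim : n / i ∈ n.divisors := Nat.mem_divisors.mpr ⟨Nat.div_dvd_of_dvd hdvd, hn0⟩
  have hini : i ≤ n / i := (Nat.le_div_iff_mul_le (by omega)).mpr hii
  have hstep : ∀ d ∈ n.divisors,
      (if i ≤ d ∧ i ≤ n / d then pvTerm f g n d else 0)
        = (if d = i then pvTerm f g n d else 0)
          + (if d = n / i ∧ n / i ≠ i then pvTerm f g n d else 0)
          + (if i + 1 ≤ d ∧ i + 1 ≤ n / d then pvTerm f g n d else 0) := by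
    intro d hd
    obtain ⟨hdvd', _⟩ := Nat.mem_divisors.mp hd
    have hdpos : 0 < d := Nat.pos_of_mem_divisors hd
    have hddiv : n / (n / d) = d := Nat.div_div_self hdvd' hn0
    by_cases hdi : d = i
    · have hc2 : i ≤ n / d := by rw [hdi]; exact hini
      rw [if_pos ⟨le_of_eq hdi.symm, hc2⟩, if_pos hdi,
        if_neg (fun hx => hx.2 (hx.1.symm.trans hdi)),
        if_neg (fun hx => by have := hx.1; omega)]
      ring
    · by_cases hdni : d = n / i
      · have hsq : n / i ≠ i := fun h => hdi (hdni.trans h)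
        have hnd : n / d = i := by rw [hdni, hni]
        rw [if_pos ⟨by rw [hdni]; exact hini, le_of_eq hnd.symm⟩,
          if_neg hdi, if_pos ⟨hdni, hsq⟩,
          if_neg (fun hx => by have := hx.2; rw [hnd] at this; omega)]
        ring
      · have hndne : n / d ≠ i := fun h => hdni (by rw [← h]; exact hddiv.symm)
        by_cases hc : i ≤ d ∧ i ≤ n / d
        · rw [if_pos hc, if_neg hdi, if_neg (fun hx => hdni hx.1),
            if_pos ⟨Nat.lt_of_le_of_ne hc.1 (Ne.symm hdi),
              Nat.lt_of_le_of_ne hc.2 (Ne.symm hndne)⟩]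
          ring
        · rw [if_neg hc, if_neg hdi, if_neg (fun hx => hdni hx.1),
            if_neg (fun hx => hc ⟨Nat.le_of_succ_le hx.1, Nat.le_of_succ_le hx.2⟩)]
          ring
  rw [Finset.sum_congr rfl hstep, Finset.sum_add_distrib, Finset.sum_add_distrib,
    Finset.sum_ite_eq' n.divisors i (fun d => pvTerm f g n d), if_pos hiy]
  by_cases hsq : n / i = i
  · have hz : (∑ d ∈ n.divisors, if d = n / i ∧ n / i ≠ i then pvTerm f g n d else 0) = 0 := by
      refine Finset.sum_eq_zero ?_
      intro d _
      rw [if_neg (fun hx => hx.2 hsq)]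
    rw [hz, if_neg (fun hx => hx hsq)]
  · have hz : (∑ d ∈ n.divisors, if d = n / i ∧ n / i ≠ i then pvTerm f g n d else 0)
        = ∑ d ∈ n.divisors, if d = n / i then pvTerm f g n d else 0 := by
      refine Finset.sum_congr rfl ?_
      intro d _
      by_cases hdn : d = n / i
      · rw [if_pos ⟨hdn, hsq⟩, if_pos hdn]
      · rw [if_neg (fun hx => hdn hx.1), if_neg hdn]
    rw [hz, Finset.sum_ite_eq' n.divisors (n / i) (fun d => pvTerm f g n d), if_pos hnim,
      if_pos hsq]

theorem pvSumZeroB (f g : List Int) (n i : ℕ) (hii : ¬ i * i ≤ n) :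
    (∑ d ∈ n.divisors, if i ≤ d ∧ i ≤ n / d then pvTerm f g n d else 0) = 0 := by
  refine Finset.sum_eq_zero ?_
  intro d hd
  obtain ⟨hdvd, hn0⟩ := Nat.mem_divisors.mp hd
  have hcond : ¬ (i ≤ d ∧ i ≤ n / d) := by
    rintro ⟨h1, h2⟩
    have hmul : d * (n / d) = n := Nat.mul_div_cancel' hdvd
    exact hii (hmul ▸ Nat.mul_le_mul h1 h2)
  rw [if_neg hcond]

theorem pvInnerB_spec (f g : List Int) (n : ℕ) :
    ∀ (m i : ℕ), n + 1 - i ≤ m → 1 ≤ i → ∀ X : Int,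
      pvInnerB f g (n : Int) (i : Int) (X % pvMOD)
        = (X + ∑ d ∈ n.divisors, if i ≤ d ∧ i ≤ n / d then pvTerm f g n d else 0) % pvMOD := by
  intro m
  induction m with
  | zero =>
    intro i hm hi X
    have hii : ¬ i * i ≤ n := by
      intro hle
      have h1 : i ≤ i * i := Nat.le_mul_of_pos_left i (by omega)
      omega
    rw [pvInnerB, dif_neg (by exact_mod_cast hii), pvSumZeroB f g n i hii, add_zero]
  | succ m ih =>
    intro i hm hi X
    by_cases hii : i * i ≤ n
    · have hiic : (i : Int) * (i : Int) ≤ (n : Int) := by exact_mod_cast hii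
      have hin : i ≤ n := le_trans (Nat.le_mul_of_pos_left i (by omega)) hii
      rw [pvInnerB, dif_pos hiic]
      by_cases hdvd : i ∣ n
      · have hdvdc : ((i : Int)) ∣ (n : Int) := Int.natCast_dvd_natCast.mpr hdvd
        have hmod : PySem.Int.mod (n : Int) (i : Int) = 0 :=
          (PySem.Int.mod_eq_zero_iff_dvd _ _).mpr hdvdc
        have hfd : PySem.Int.floordiv (n : Int) (i : Int) = ((n / i : ℕ) : Int) :=
          PySem.Int.floordiv_natCast n i
        have hni : n / (n / i) = i := Nat.div_div_self hdvd (by omega)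
        rw [if_pos hmod, hfd]
        by_cases hsq : n / i = i
        · have hje : ¬ (((n / i : ℕ) : Int) ≠ (i : Int)) := by simp [hsq]
          rw [if_neg hje]
          have h1 : (X % pvMOD + PySem.List.pyGetD f (i : Int) 0 *
              PySem.List.pyGetD g ((n / i : ℕ) : Int) 0) % pvMOD
              = (X + pvTerm f g n i) % pvMOD := by
            rw [pvModFold]
            congr 1
            simp only [pvTerm, PySem.List.pyGetD_natCast]
          rw [h1]
          rw [show ((i : Int) + 1) = ((i + 1 : ℕ) : Int) by push_cast; ring]
          rw [ih (i + 1) (by omega) (by omega)]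
          rw [pvSumStepB f g n i (by omega) hi hii hdvd]
          rw [if_neg (fun hx => hx hsq)]
          congr 1
          ring
        · have hje : (((n / i : ℕ) : Int) ≠ (i : Int)) := by exact_mod_cast hsq
          rw [if_pos hje]
          have h1 : ((X % pvMOD + PySem.List.pyGetD f (i : Int) 0 *
              PySem.List.pyGetD g ((n / i : ℕ) : Int) 0) % pvMOD +
              PySem.List.pyGetD f ((n / i : ℕ) : Int) 0 * PySem.List.pyGetD g (i : Int) 0) % pvMOD
              = (X + pvTerm f g n i + pvTerm f g n (n / i)) % pvMOD := by
            rw [pvModFold2]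
            congr 1
            simp only [pvTerm, PySem.List.pyGetD_natCast, hni]
          rw [h1]
          rw [show ((i : Int) + 1) = ((i + 1 : ℕ) : Int) by push_cast; ring]
          rw [ih (i + 1) (by omega) (by omega)]
          rw [pvSumStepB f g n i (by omega) hi hii hdvd]
          rw [if_pos hsq]
          congr 1
          ring
      · have hmod : ¬ PySem.Int.mod (n : Int) (i : Int) = 0 := by
          rw [PySem.Int.mod_eq_zero_iff_dvd]
          intro h
          exact hdvd (Int.natCast_dvd_natCast.mp h)
        rw [if_neg hmod]
        rw [show ((i : Int) + 1) = ((i + 1 : ℕ) : Int) by push_cast; ring]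
        rw [ih (i + 1) (by omega) (by omega)]
        rw [pvSumSameB f g n i (by omega) hdvd]
    · rw [pvInnerB, dif_neg (by exact_mod_cast hii), pvSumZeroB f g n i hii, add_zero]

theorem pvInnerB_one (f g : List Int) (n : ℕ) (hn : 1 ≤ n) :
    pvInnerB f g (n : Int) 1 0 = pvS f g n := by
  have h0 : (0 : Int) % pvMOD = 0 := Int.zero_emod _
  have hsp := pvInnerB_spec f g n (n + 1) 1 (by omega) (by omega) 0
  rw [h0] at hsp
  push_cast at hsp
  rw [hsp, zero_add, pvS]
  congr 1
  refine Finset.sum_congr rfl ?_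
  intro d hd
  obtain ⟨hdvd, hn0⟩ := Nat.mem_divisors.mp hd
  have hdpos : 0 < d := Nat.pos_of_mem_divisors hd
  have hq : 0 < n / d := Nat.div_pos (Nat.le_of_dvd (by omega) hdvd) hdpos
  rw [if_pos ⟨hdpos, hq⟩]

-- ---- A side ----

theorem pvInnerA_length (fi : Int) (g : List Int) (k i m : Int) (h : List Int) :
    (pvInnerA fi g k i m h).length = h.length := by
  fun_induction pvInnerA with
  | case1 m h hc ih => rw [ih, PySem.List.length_pySetD]
  | case2 m h hc => rfl

theorem pvSumStepA (f g : List Int) (j m : ℕ) (hj : 1 ≤ j) :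
    (∑ d ∈ j.divisors, if d ≤ m + 1 then pvTerm f g j d else 0)
      = (∑ d ∈ j.divisors, if d ≤ m then pvTerm f g j d else 0)
        + (if (m + 1) ∣ j then pvTerm f g j (m + 1) else 0) := by
  have hstep : ∀ d ∈ j.divisors,
      (if d ≤ m + 1 then pvTerm f g j d else 0)
        = (if d ≤ m then pvTerm f g j d else 0) + (if d = m + 1 then pvTerm f g j d else 0) := by
    intro d _
    split_ifs <;> first | omega | ring1
  rw [Finset.sum_congr rfl hstep, Finset.sum_add_distrib]
  rw [Finset.sum_ite_eq' j.divisors (m + 1) (fun d => pvTerm f g j d)]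
  by_cases hdv : (m + 1) ∣ j
  · rw [if_pos (Nat.mem_divisors.mpr ⟨hdv, by omega⟩), if_pos hdv]
  · rw [if_neg (fun hmem => hdv (Nat.mem_divisors.mp hmem).1), if_neg hdv]

theorem pvInnerA_getD (fi : Int) (g : List Int) (k i : Int) (hi : 1 ≤ i) :
    ∀ (c : ℕ) (m : Int), (k + 1 - m).toNat ≤ c → 1 ≤ m → ∀ (h : List Int) (j : ℕ),
      (pvInnerA fi g k i m h).getD j 0 =
        if m ≤ (j : Int) ∧ (j : Int) ≤ k ∧ i ∣ ((j : Int) - m) ∧ j < h.length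
        then (h.getD j 0 + fi * PySem.List.pyGetD g (PySem.Int.floordiv (j : Int) i) 0) % pvMOD
        else h.getD j 0 := by
  intro c
  induction c with
  | zero =>
    intro m hm hm1 h j
    rw [pvInnerA, dif_neg (by rintro ⟨-, hx⟩; omega)]
    rw [if_neg (by rintro ⟨h1, h2, -, -⟩; omega)]
  | succ c ih =>
    intro m hm hm1 h j
    by_cases hmk : m ≤ k
    · rw [pvInnerA, dif_pos ⟨hi, hmk⟩]
      rw [PySem.List.pySetD_of_nonneg _ _ (by omega : (0:Int) ≤ m)]
      rw [ih (m + i) (by omega) (by omega)]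
      set v := (PySem.List.pyGetD h m 0 + fi * PySem.List.pyGetD g (PySem.Int.floordiv m i) 0) % pvMOD with hv
      have hlen : (h.set m.toNat v).length = h.length := by simp
      by_cases hjm : (j : Int) = m
      · by_cases hjl : j < h.length
        · rw [if_neg (by rintro ⟨h1, -, -, -⟩; omega)]
          rw [pvGetD_set, if_pos ⟨by omega, hjl⟩]
          rw [if_pos ⟨by omega, by omega, by rw [hjm]; simp, hjl⟩]
          rw [hv]
          have hh : PySem.List.pyGetD h m 0 = h.getD j 0 := by
            rw [← hjm, PySem.List.pyGetD_natCast]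
          rw [hh, hjm]
        · rw [if_neg (by rintro ⟨h1, -, -, -⟩; omega)]
          rw [pvGetD_set, if_neg (by rintro ⟨-, h2⟩; omega)]
          rw [if_neg (by rintro ⟨-, -, -, h4⟩; omega)]
      · have hgd : (h.set m.toNat v).getD j 0 = h.getD j 0 := by
          rw [pvGetD_set, if_neg (by rintro ⟨h1, -⟩; omega)]
        have hdvd_iff : i ∣ ((j : Int) - (m + i)) ↔ i ∣ ((j : Int) - m) := by
          constructor
          · intro hd
            have he : (j : Int) - m = ((j : Int) - (m + i)) + i := by ring
            rw [he]; exact dvd_add hd dvd_rfl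
          · intro hd
            have he : (j : Int) - (m + i) = ((j : Int) - m) - i := by ring
            rw [he]; exact dvd_sub hd dvd_rfl
        by_cases hC : m ≤ (j : Int) ∧ (j : Int) ≤ k ∧ i ∣ ((j : Int) - m) ∧ j < h.length
        · obtain ⟨h1, h2, h3, h4⟩ := hC
          have hge : m + i ≤ (j : Int) := by
            have := Int.le_of_dvd (by omega) h3
            omega
          rw [if_pos ⟨hge, h2, hdvd_iff.mpr h3, by omega⟩]
          rw [if_pos ⟨h1, h2, h3, h4⟩, hgd]
        · rw [if_neg (by
              rintro ⟨h1, h2, h3, h4⟩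
              exact hC ⟨by omega, h2, hdvd_iff.mp h3, by omega⟩)]
          rw [if_neg hC]
          exact hgd
    · rw [pvInnerA, dif_neg (by rintro ⟨-, hx⟩; omega)]
      rw [if_neg (by rintro ⟨h1, h2, -, -⟩; omega)]

-- ---- fold lemmas ----

theorem pvStepA_length (f g : List Int) (k : Int) (h : List Int) (i : Int) :
    (pvStepA f g k h i).length = h.length := by
  show (if PySem.List.pyGetD f i 0 ≠ 0 then
      pvInnerA (PySem.List.pyGetD f i 0) g k i i h else h).length = h.length
  split
  · exact pvInnerA_length ..
  · rfl

theorem pvFoldA_length (f g : List Int) (k : Int) (L : List Int) (h0 : List Int) :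
    (L.foldl (pvStepA f g k) h0).length = h0.length := by
  induction L generalizing h0 with
  | nil => rfl
  | cons a L ih => rw [List.foldl_cons, ih, pvStepA_length]

theorem pvStepB_length (f g : List Int) (h : List Int) (n : Int) :
    (pvStepB f g h n).length = h.length := by
  unfold pvStepB
  exact PySem.List.length_pySetD ..

theorem pvFoldB_length (f g : List Int) (L : List Int) (h0 : List Int) :
    (L.foldl (pvStepB f g) h0).length = h0.length := by
  induction L generalizing h0 with
  | nil => rfl
  | cons a L ih => rw [List.foldl_cons, ih, pvStepB_length]

theorem pvOuterA (f g : List Int) (k : Int) :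
    ∀ (m : ℕ) (j : ℕ),
      ((PySem.List.pyRange 1 ((m : Int) + 1) 1).foldl (pvStepA f g k)
          (List.replicate (k + 1).toNat 0)).getD j 0
        = if 1 ≤ j ∧ (j : Int) ≤ k
          then (∑ d ∈ j.divisors, if d ≤ m then pvTerm f g j d else 0) % pvMOD else 0 := by
  intro m
  induction m with
  | zero =>
    intro j
    rw [show ((0 : ℕ) : Int) + 1 = 1 by norm_num]
    rw [PySem.List.pyRange_one_eq_nil le_rfl]
    rw [List.foldl_nil]
    have hrep : (List.replicate (k + 1).toNat (0 : Int)).getD j 0 = 0 := by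
      rcases Nat.lt_or_ge j (k + 1).toNat with hlt | hge
      · rw [List.getD_eq_getElem _ _ (by simpa using hlt), List.getElem_replicate]
      · rw [List.getD_eq_default _ _ (by simpa using hge)]
    rw [hrep]
    split_ifs with hc
    · have hz : (∑ d ∈ j.divisors, if d ≤ 0 then pvTerm f g j d else 0) = 0 := by
        refine Finset.sum_eq_zero ?_
        intro d hd
        have := Nat.pos_of_mem_divisors hd
        rw [if_neg (by omega)]
      rw [hz, Int.zero_emod]
    · rfl
  | succ m ih =>
    intro j
    have hsplit : PySem.List.pyRange 1 (((m + 1 : ℕ) : Int) + 1) 1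
        = PySem.List.pyRange 1 ((m : Int) + 1) 1 ++ [(m : Int) + 1] := by
      have hx := PySem.List.pyRange_one_succ_right (a := 1) (b := (m : Int) + 1) (by omega)
      push_cast
      push_cast at hx
      exact hx
    rw [hsplit, List.foldl_append, List.foldl_cons, List.foldl_nil]
    have hlen : ((PySem.List.pyRange 1 ((m : Int) + 1) 1).foldl (pvStepA f g k)
        (List.replicate (k + 1).toNat 0)).length = (k + 1).toNat := by
      rw [pvFoldA_length, List.length_replicate]
    have hfi : PySem.List.pyGetD f ((m : Int) + 1) 0 = f.getD (m + 1) 0 := by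
      rw [show ((m : Int) + 1) = ((m + 1 : ℕ) : Int) by push_cast; ring]
      exact PySem.List.pyGetD_natCast ..
    have hstep_eq : pvStepA f g k
        ((PySem.List.pyRange 1 ((m : Int) + 1) 1).foldl (pvStepA f g k)
          (List.replicate (k + 1).toNat 0)) ((m : Int) + 1)
        = if f.getD (m + 1) 0 ≠ 0 then
            pvInnerA (f.getD (m + 1) 0) g k ((m : Int) + 1) ((m : Int) + 1)
              ((PySem.List.pyRange 1 ((m : Int) + 1) 1).foldl (pvStepA f g k)
                (List.replicate (k + 1).toNat 0))
          else ((PySem.List.pyRange 1 ((m : Int) + 1) 1).foldl (pvStepA f g k)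
                (List.replicate (k + 1).toNat 0)) := by
      show (if PySem.List.pyGetD f ((m : Int) + 1) 0 ≠ 0 then _ else _) = _
      rw [hfi]
    rw [hstep_eq]
    by_cases hf0 : f.getD (m + 1) 0 = 0
    · rw [if_neg (fun hx => hx hf0)]
      rw [ih j]
      by_cases hcj : 1 ≤ j ∧ (j : Int) ≤ k
      · rw [if_pos hcj, if_pos hcj, pvSumStepA f g j m hcj.1]
        have hzero : (if (m + 1) ∣ j then pvTerm f g j (m + 1) else 0) = 0 := by
          split_ifs
          · simp only [pvTerm, hf0, zero_mul]
          · rfl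
        rw [hzero, add_zero]
      · rw [if_neg hcj, if_neg hcj]
    · rw [if_pos hf0]
      rw [pvInnerA_getD (f.getD (m + 1) 0) g k ((m : Int) + 1) (by omega)
        ((k + 1 - ((m : Int) + 1)).toNat) ((m : Int) + 1) le_rfl (by omega) _ j]
      by_cases hj1 : 1 ≤ j
      · by_cases hjk : (j : Int) ≤ k
        · by_cases hdv : (m + 1) ∣ j
          · have hjm : m + 1 ≤ j := Nat.le_of_dvd (by omega) hdv
            have hdvc : ((m : Int) + 1) ∣ ((j : Int) - ((m : Int) + 1)) := by
              have hq : ((m + 1 : ℕ) : Int) ∣ ((j : ℕ) : Int) := Int.natCast_dvd_natCast.mpr hdv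
              push_cast at hq
              exact dvd_sub hq dvd_rfl
            rw [if_pos ⟨by omega, hjk, hdvc, by omega⟩]
            rw [ih j, if_pos ⟨hj1, hjk⟩]
            rw [pvModFold]
            rw [if_pos ⟨hj1, hjk⟩]
            rw [pvSumStepA f g j m (by omega), if_pos hdv]
            congr 1
            have hfd : PySem.Int.floordiv ((j : ℕ) : Int) ((m : Int) + 1)
                = ((j / (m + 1) : ℕ) : Int) := by
              rw [show ((m : Int) + 1) = ((m + 1 : ℕ) : Int) by push_cast; ring]
              exact PySem.Int.floordiv_natCast j (m + 1)
            rw [hfd, PySem.List.pyGetD_natCast]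
            simp only [pvTerm]
          · have hndc : ¬ ((m : Int) + 1) ∣ ((j : Int) - ((m : Int) + 1)) := by
              intro hd
              have hq : ((m : Int) + 1) ∣ (j : Int) := by
                have he : (j : Int) = ((j : Int) - ((m : Int) + 1)) + ((m : Int) + 1) := by ring
                rw [he]
                exact dvd_add hd dvd_rfl
              have hq2 : ((m + 1 : ℕ) : Int) ∣ ((j : ℕ) : Int) := by push_cast; exact hq
              exact hdv (Int.natCast_dvd_natCast.mp hq2)
            rw [if_neg (by rintro ⟨-, -, h3, -⟩; exact hndc h3)]
            rw [ih j, if_pos ⟨hj1, hjk⟩, if_pos ⟨hj1, hjk⟩]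
            rw [pvSumStepA f g j m (by omega), if_neg hdv, add_zero]
        · rw [if_neg (by rintro ⟨-, h2, -, -⟩; exact hjk h2)]
          rw [ih j, if_neg (by rintro ⟨-, h2⟩; exact hjk h2),
            if_neg (by rintro ⟨-, h2⟩; exact hjk h2)]
      · rw [if_neg (by rintro ⟨hx, -, -, -⟩; omega)]
        rw [ih j, if_neg (by rintro ⟨hx, -⟩; omega), if_neg (by rintro ⟨hx, -⟩; omega)]

theorem pvOuterB (f g : List Int) (k : Int) :
    ∀ (m : ℕ) (j : ℕ),
      ((PySem.List.pyRange 1 ((m : Int) + 1) 1).foldl (pvStepB f g)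
          (List.replicate (k + 1).toNat 0)).getD j 0
        = if 1 ≤ j ∧ j ≤ m ∧ j < (k + 1).toNat
          then pvInnerB f g (j : Int) 1 0 else 0 := by
  intro m
  induction m with
  | zero =>
    intro j
    rw [show ((0 : ℕ) : Int) + 1 = 1 by norm_num]
    rw [PySem.List.pyRange_one_eq_nil le_rfl, List.foldl_nil]
    rw [if_neg (by omega)]
    rcases Nat.lt_or_ge j (k + 1).toNat with hlt | hge
    · rw [List.getD_eq_getElem _ _ (by simpa using hlt), List.getElem_replicate]
    · rw [List.getD_eq_default _ _ (by simpa using hge)]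
  | succ m ih =>
    intro j
    have hsplit : PySem.List.pyRange 1 (((m + 1 : ℕ) : Int) + 1) 1
        = PySem.List.pyRange 1 ((m : Int) + 1) 1 ++ [(m : Int) + 1] := by
      have hx := PySem.List.pyRange_one_succ_right (a := 1) (b := (m : Int) + 1) (by omega)
      push_cast
      push_cast at hx
      exact hx
    rw [hsplit, List.foldl_append, List.foldl_cons, List.foldl_nil]
    have hlen : ((PySem.List.pyRange 1 ((m : Int) + 1) 1).foldl (pvStepB f g)
        (List.replicate (k + 1).toNat 0)).length = (k + 1).toNat := by
      rw [pvFoldB_length, List.length_replicate]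
    rw [pvStepB]
    rw [PySem.List.pySetD_of_nonneg _ _ (by omega : (0:Int) ≤ (m : Int) + 1)]
    rw [pvGetD_set]
    by_cases hjm : j = ((m : Int) + 1).toNat
    · by_cases hjl : j < ((PySem.List.pyRange 1 ((m : Int) + 1) 1).foldl (pvStepB f g)
          (List.replicate (k + 1).toNat 0)).length
      · rw [if_pos ⟨hjm, hjl⟩, if_pos ⟨by omega, by omega, by omega⟩]
        have hjval : ((j : ℕ) : Int) = (m : Int) + 1 := by omega
        rw [hjval]
      · rw [if_neg (by rintro ⟨-, h2⟩; omega)]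
        rw [ih j, if_neg (by rintro ⟨-, h2, -⟩; omega), if_neg (by rintro ⟨-, -, h3⟩; omega)]
    · rw [if_neg (by rintro ⟨h1, -⟩; omega)]
      rw [ih j]
      by_cases hc : 1 ≤ j ∧ j ≤ m ∧ j < (k + 1).toNat
      · rw [if_pos hc, if_pos ⟨hc.1, by omega, hc.2.2⟩]
      · rw [if_neg hc, if_neg (by rintro ⟨a1, a2, a3⟩; exact hc ⟨a1, by omega, a3⟩)]

-- ===== VERDICT (by name: the statement is the Claim_ definition above) =====
theorem dirichlet_convolution_spec : Claim_equal_dirichlet_convolution := by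
  intro f g k _hdom _hpre
  unfold Spec_dirichlet_convolution
  unfold dirichlet_convolution dirichlet_convolution_alt
  by_cases hk : k ≤ 0
  · rw [PySem.List.pyRange_one_eq_nil (by omega)]
    rfl
  · have hA := pvOuterA f g k k.toNat
    have hB := pvOuterB f g k k.toNat
    rw [show ((k.toNat : ℕ) : Int) = k by omega] at hA hB
    apply List.ext_getElem
    · rw [pvFoldA_length, pvFoldB_length]
    · intro n h1 h2
      have hn' : n < (k + 1).toNat := by
        rw [pvFoldA_length, List.length_replicate] at h1
        exact h1
      rw [← List.getD_eq_getElem _ 0 h1, ← List.getD_eq_getElem _ 0 h2]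
      rw [hA n, hB n]
      by_cases hc : 1 ≤ n ∧ (n : Int) ≤ k
      · rw [if_pos hc, if_pos ⟨hc.1, by omega, hn'⟩]
        rw [pvInnerB_one f g n hc.1, pvS]
        congr 1
        refine Finset.sum_congr rfl ?_
        intro d hd
        obtain ⟨hdvd, hn0⟩ := Nat.mem_divisors.mp hd
        have hdn : d ≤ n := Nat.le_of_dvd (by omega) hdvd
        rw [if_pos (by omega)]
      · rw [if_neg hc, if_neg (by rintro ⟨a1, a2, -⟩; exact hc ⟨a1, by omega⟩)]
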